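-- pv_equiv track=rewrite | github.com/Parzival7566/NPTEL-Final-Programming-Assignment-Solutions | NPTEL Final Programming Assignment Solutions.py | maxaggregate
-- ===== SOURCE A (Python) =====
-- def maxaggregate(l):
--   tracker = {}
--   for i in l:
--     if i[0] in tracker:
--       tracker[i[0]] += i[1]
--     else:
--       tracker[i[0]] = i[1]
--   m = max(list(tracker.values()))
--   x = []
--   for i in tracker:
--     if tracker[i] == m:
--       x.append(i)
--   return sorted(x)
-- ===== SOURCE B (Python) =====
-- def maxaggregate(l):
--   s = sorted(l, key=lambda p: p[0])
--   best = None
--   winners = []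
--   i = 0
--   n = len(s)
--   while i < n:
--     k = s[i][0]
--     total = 0
--     while i < n and s[i][0] == k:
--       total += s[i][1]
--       i += 1
--     if best is None or total > best:
--       best = total
--       winners = [k]
--     elif total == best:
--       winners.append(k)
--   return winners
-- ===== Notes on version B (the rewrite author's own statement) =====
-- stated objective: alternative
-- what changed: B uses no dictionary at all: it sorts the pairs by key, scans the sorted list once summing each consecutive equal-key run while maintaining the running maximum and its winner keys, which emerge already in sorted order (so A's aggregation dict, separate max pass, filter pass and final sort all disappear).
-- outside the precondition, e.g. on maxaggregate([]): A raises ValueError, B returns []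
import Mathlib
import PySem

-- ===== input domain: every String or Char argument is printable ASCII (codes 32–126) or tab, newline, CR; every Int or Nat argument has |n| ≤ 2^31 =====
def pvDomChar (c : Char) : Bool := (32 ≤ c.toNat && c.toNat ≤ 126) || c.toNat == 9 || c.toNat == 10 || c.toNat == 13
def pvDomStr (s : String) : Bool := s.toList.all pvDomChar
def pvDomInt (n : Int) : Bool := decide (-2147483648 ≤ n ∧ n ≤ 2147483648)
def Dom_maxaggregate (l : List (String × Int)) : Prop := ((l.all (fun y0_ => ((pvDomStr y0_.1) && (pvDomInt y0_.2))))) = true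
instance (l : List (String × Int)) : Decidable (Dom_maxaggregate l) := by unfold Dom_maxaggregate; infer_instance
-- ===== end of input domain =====

-- B replaces A's dict aggregation + max pass + filter pass + sort by sorting the pairs by key and
-- scanning consecutive equal-key runs once, keeping the running maximum and its (already sorted) keys.


-- ===== PORT A =====
-- for i in l: if i[0] in tracker: tracker[i[0]] += i[1] else: tracker[i[0]] = i[1]
-- (`tracker[i[0]] += i[1]` = insert of the existing value — the `in` branch guarantees it — plus i[1])
-- m = max(list(tracker.values())): ValueError on an empty list (l = []) — excluded by Pre_; the `none` arm is unreachable there.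
-- for i in tracker: if tracker[i] == m: x.append(i)  (the lookup `tracker[i]` never misses: i ranges over the keys)
def maxaggregate (l : List (String × Int)) : List String :=
  let tracker := l.foldl
    (fun d i => if d.contains i.1 then d.insert i.1 ((d.get? i.1).getD 0 + i.2)
                else d.insert i.1 i.2) PySem.Dict.empty
  match PySem.List.max? tracker.values (fun y => y) with
  | none => []
  | some m =>
    let x := tracker.keys.foldl (fun acc i => if tracker.getD i 0 = m then acc ++ [i] else acc) []
    PySem.List.sorted x (fun s => s) false

-- ===== PORT B =====
-- inner while loop: 'while i < n and s[i][0] == k: total += s[i][1]; i += 1' — recursion on the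
-- suffix of the sorted list from position i, returning (total, remaining suffix)
def pvBRun (k : String) (xs : List (String × Int)) (total : Int) : Int × List (String × Int) :=
  match xs with
  | [] => (total, [])
  | p :: t => if p.1 == k then pvBRun k t (total + p.2) else (total, p :: t)

-- the remaining suffix is no longer than the input (termination of the outer loop)
theorem pvBRun_length_le (k : String) (xs : List (String × Int)) (total : Int) :
    (pvBRun k xs total).2.length ≤ xs.length := by
  induction xs generalizing total with
  | nil => simp [pvBRun]
  | cons p t ih =>
    by_cases h : p.1 == k
    · simpa [pvBRun, h] using (ih (total + p.2)).trans (Nat.le_succ _)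
    · simp [pvBRun, h]

-- outer while loop over the sorted list, state = (best : Option Int, winners)
def pvBScan (xs : List (String × Int)) (best : Option Int) (winners : List String) : List String :=
  match xs with
  | [] => winners
  | p :: t =>
    let r := pvBRun p.1 t p.2
    match best with
    | none => pvBScan r.2 (some r.1) [p.1]
    | some b =>
      if r.1 > b then pvBScan r.2 (some r.1) [p.1]
      else if r.1 = b then pvBScan r.2 (some b) (winners ++ [p.1])
      else pvBScan r.2 (some b) winners
termination_by xs.length
decreasing_by
  all_goals
    simpa [List.length_cons] using
      Nat.lt_succ_of_le (pvBRun_length_le p.1 t p.2)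

def maxaggregate_alt (l : List (String × Int)) : List String :=
  pvBScan (PySem.List.sorted l (fun p => p.1) false) none []

-- ===== PRECONDITION & SPEC =====
-- Pre_ excludes only the empty list, on which A's max([]) raises ValueError.
def Pre_maxaggregate (l : List (String × Int)) : Prop := l ≠ []
instance (l : List (String × Int)) : Decidable (Pre_maxaggregate l) := by unfold Pre_maxaggregate; infer_instance
def pvWitness_maxaggregate : (List (String × Int)) := [("a", 1), ("b", 2), ("a", 1)]

def Spec_maxaggregate (l : List (String × Int)) (out : List String) : Prop := out = maxaggregate_alt l
instance (l : List (String × Int)) (out : List String) : Decidable (Spec_maxaggregate l out) := by unfold Spec_maxaggregate; infer_instance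

-- ===== CLAIM (what is proved, stated in full; the proofs are below) =====
def Claim_equal_maxaggregate : Prop := ∀ (l : List (String × Int)), Dom_maxaggregate l → Pre_maxaggregate l → Spec_maxaggregate l (maxaggregate l)
-- ===== LEMMAS AND PROOFS =====

-- the aggregate sum of key k in a pair list
def pvS (l : List (String × Int)) (k : String) : Int := ((l.filter (fun p => p.1 == k)).map Prod.snd).sum
-- the distinct keys, first occurrences in order
def pvK (l : List (String × Int)) : List String := PySem.Set.ofList (l.map Prod.fst)

theorem pvS_nil (k : String) : pvS [] k = 0 := rfl

theorem pvS_cons (p : String × Int) (t : List (String × Int)) (k : String) :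
    pvS (p :: t) k = (if p.1 = k then p.2 else 0) + pvS t k := by
  by_cases h : p.1 = k <;> simp [pvS, List.filter_cons, h]

theorem pvS_append (a b : List (String × Int)) (k : String) :
    pvS (a ++ b) k = pvS a k + pvS b k := by
  simp [pvS, List.filter_append]

theorem pvS_eq_zero_of_not_key (t : List (String × Int)) (k : String)
    (h : ∀ q ∈ t, q.1 ≠ k) : pvS t k = 0 := by
  have : t.filter (fun p => p.1 == k) = [] := by
    apply List.filter_eq_nil_iff.mpr
    intro q hq
    simpa using h q hq
  simp [pvS, this]

theorem pvS_perm (a b : List (String × Int)) (h : a.Perm b) (k : String) :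
    pvS a k = pvS b k := by
  exact List.Perm.sum_eq ((h.filter _).map _)

-- Python's max over a nonempty Int list: its value is the unique maximum
theorem max?_id_eq_some (xs : List Int) (m : Int) (hmem : m ∈ xs)
    (hmax : ∀ y ∈ xs, y ≤ m) : PySem.List.max? xs (fun y => y) = some m := by
  cases h : PySem.List.max? xs (fun y => y) with
  | none =>
    rw [PySem.List.max?_eq_none_iff] at h
    simp [h] at hmem
  | some m' =>
    have h1 : m' ∈ xs := PySem.List.max?_mem h
    have h2 := PySem.List.max?_isMax h m hmem
    have h3 := hmax m' h1
    exact congrArg some (le_antisymm h3 h2)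

-- ---- A SIDE: maxaggregate l in terms of pvK and pvS ----

theorem tracker_eq (l : List (String × Int)) :
    l.foldl (fun d i => if d.contains i.1 then d.insert i.1 ((d.get? i.1).getD 0 + i.2)
                        else d.insert i.1 i.2) (PySem.Dict.empty : PySem.Dict String Int)
    = l.foldl (fun d p => d.insert p.1 (d.getD p.1 0 + p.2)) PySem.Dict.empty := by
  have hstep : ∀ (d : PySem.Dict String Int) (i : String × Int),
      (if d.contains i.1 then d.insert i.1 ((d.get? i.1).getD 0 + i.2) else d.insert i.1 i.2)
      = d.insert i.1 (d.getD i.1 0 + i.2) := by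
    intro d i
    by_cases h : d.contains i.1
    · simp [h, PySem.Dict.getD_eq_get?_getD]
    · have h' : d.contains i.1 = false := by simpa using h
      simp [h', PySem.Dict.getD_of_not_contains d 0 h']
  simp only [hstep]

theorem tracker_getD (l : List (String × Int)) :
    ∀ (d : PySem.Dict String Int) (k : String),
      (l.foldl (fun d p => d.insert p.1 (d.getD p.1 0 + p.2)) d).getD k 0
        = d.getD k 0 + pvS l k := by
  induction l with
  | nil => intro d k; simp [pvS_nil]
  | cons p t ih =>
    intro d k
    simp only [List.foldl_cons]
    rw [ih, pvS_cons, PySem.Dict.getD_insert]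
    by_cases h : k = p.1
    · simp [h]; ring
    · have h' : p.1 ≠ k := fun hh => h hh.symm
      simp [h, h']

theorem tracker_keys (l : List (String × Int)) :
    (l.foldl (fun d p => d.insert p.1 (d.getD p.1 0 + p.2))
      (PySem.Dict.empty : PySem.Dict String Int)).keys = pvK l := by
  rw [PySem.Dict.keys_foldl_insert_key]
  simp [pvK, PySem.Set.update, PySem.Set.ofList, PySem.Set.empty]

theorem filt_loop (d : PySem.Dict String Int) (m : Int) :
    d.keys.foldl (fun acc i => if d.getD i 0 = m then acc ++ [i] else acc) []
      = d.keys.filter (fun i => decide (d.getD i 0 = m)) := by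
  simpa using PySem.List.foldl_append_if (fun i => decide (d.getD i 0 = m)) id d.keys []

theorem A_normal_form (l : List (String × Int)) :
    maxaggregate l
      = match PySem.List.max? ((pvK l).map (pvS l)) (fun y => y) with
        | none => []
        | some m => PySem.List.sorted ((pvK l).filter (fun k => decide (pvS l k = m)))
            (fun s => s) false := by
  have hnodup : (l.foldl (fun d p => d.insert p.1 (d.getD p.1 0 + p.2))
      (PySem.Dict.empty : PySem.Dict String Int)).keys.Nodup :=
    PySem.Dict.nodup_keys_foldl_insert_key l (fun p => p.1)
      (fun d p => d.getD p.1 0 + p.2) PySem.Dict.empty (by simp)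
  have hgetD : ∀ k, (l.foldl (fun d p => d.insert p.1 (d.getD p.1 0 + p.2))
      (PySem.Dict.empty : PySem.Dict String Int)).getD k 0 = pvS l k := by
    intro k
    rw [tracker_getD]
    simp
  have hvals : (l.foldl (fun d p => d.insert p.1 (d.getD p.1 0 + p.2))
      (PySem.Dict.empty : PySem.Dict String Int)).values = (pvK l).map (pvS l) := by
    rw [PySem.Dict.values_eq_map_keys _ hnodup 0, tracker_keys]
    exact List.map_congr_left (fun k _ => hgetD k)
  have hfilt : ∀ m : Int,
      (l.foldl (fun d p => d.insert p.1 (d.getD p.1 0 + p.2))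
        (PySem.Dict.empty : PySem.Dict String Int)).keys.foldl
        (fun acc i => if (l.foldl (fun d p => d.insert p.1 (d.getD p.1 0 + p.2))
          (PySem.Dict.empty : PySem.Dict String Int)).getD i 0 = m then acc ++ [i] else acc) []
      = (pvK l).filter (fun k => decide (pvS l k = m)) := by
    intro m
    rw [filt_loop, tracker_keys]
    exact List.filter_congr (fun k _ => by rw [hgetD])
  simp only [maxaggregate, tracker_eq, hvals, hfilt]

-- ---- B SIDE ----

-- the inner run loop: on a key-sorted suffix whose keys all dominate k,
-- it accumulates exactly the aggregate of k and leaves the strictly-greater remainder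
theorem pvBRun_spec (k : String) :
    ∀ (xs : List (String × Int)) (acc : Int),
      (∀ q ∈ xs, k ≤ q.1) → (xs.map Prod.fst).Pairwise (· ≤ ·) →
      pvBRun k xs acc = (acc + pvS xs k, xs.dropWhile (fun q => q.1 == k)) := by
  intro xs
  induction xs with
  | nil => intro acc _ _; simp [pvBRun, pvS_nil]
  | cons p t ih =>
    intro acc hall hsorted
    rw [List.map_cons] at hsorted
    obtain ⟨hhead, htail⟩ := List.pairwise_cons.mp hsorted
    by_cases h : p.1 = k
    · have hstep : pvBRun k (p :: t) acc = pvBRun k t (acc + p.2) := by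
        simp [pvBRun, h]
      have hdrop : List.dropWhile (fun q => q.1 == k) (p :: t)
          = List.dropWhile (fun (q : String × Int) => q.1 == k) t := by
        simp [h]
      rw [hstep, ih (acc + p.2) (fun q hq => hall q (List.mem_cons_of_mem _ hq)) htail,
        hdrop, pvS_cons, if_pos h]
      simp only [Prod.mk.injEq]
      exact ⟨by ring, trivial⟩
    · have hk : k < p.1 := lt_of_le_of_ne (hall p (by simp)) (fun hh => h hh.symm)
      have hzero : pvS (p :: t) k = 0 := by
        apply pvS_eq_zero_of_not_key
        intro q hq
        rcases List.mem_cons.mp hq with rfl | hq'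
        · exact h
        · have hle := hhead q.1 (List.mem_map_of_mem hq')
          exact fun hh => absurd (hh ▸ hle) (not_le_of_gt hk)
      have hstep : pvBRun k (p :: t) acc = (acc, p :: t) := by
        simp [pvBRun, h]
      have hdrop : List.dropWhile (fun q => q.1 == k) (p :: t) = p :: t := by
        simp [h]
      rw [hstep, hdrop, hzero]
      simp

-- the dropped remainder has strictly greater keys
theorem dropRun_gt (k : String) :
    ∀ (xs : List (String × Int)), (∀ q ∈ xs, k ≤ q.1) → (xs.map Prod.fst).Pairwise (· ≤ ·) →
      ∀ q ∈ xs.dropWhile (fun q => q.1 == k), k < q.1 := by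
  intro xs
  induction xs with
  | nil => intro _ _ q hq; simp at hq
  | cons p t ih =>
    intro hall hsorted q hq
    rw [List.map_cons] at hsorted
    obtain ⟨hhead, htail⟩ := List.pairwise_cons.mp hsorted
    by_cases h : p.1 = k
    · rw [show List.dropWhile (fun q => q.1 == k) (p :: t)
          = List.dropWhile (fun (q : String × Int) => q.1 == k) t from by
        simp [h]] at hq
      exact ih (fun q hq => hall q (List.mem_cons_of_mem _ hq)) htail q hq
    · rw [show List.dropWhile (fun q => q.1 == k) (p :: t) = p :: t from by
        simp [h]] at hq
      have hk : k < p.1 := lt_of_le_of_ne (hall p (by simp)) (fun hh => h hh.symm)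
      rcases List.mem_cons.mp hq with rfl | hq'
      · exact hk
      · exact lt_of_lt_of_le hk (hhead q.1 (List.mem_map_of_mem hq'))

-- ofList of a list "k, then a k-block, then a k-free tail" is k consed on ofList of the tail
-- adding a repeated element to the set is a no-op
theorem foldl_add_const (k : String) :
    ∀ (A : List String), (∀ x ∈ A, x = k) → List.foldl PySem.Set.add [k] A = [k] := by
  intro A
  induction A with
  | nil => intro _; rfl
  | cons a t iht =>
    intro hA
    rw [List.foldl_cons, show PySem.Set.add [k] a = [k] from by
      simp [PySem.Set.add, PySem.Set.contains, hA a (by simp)]]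
    exact iht (fun x hx => hA x (by simp [hx]))

-- ofList of a list "k, then a k-block, then a k-free tail" is k consed on ofList of the tail
theorem ofList_const_append (k : String) (A B : List String)
    (hA : ∀ x ∈ A, x = k) (hB : k ∉ B) :
    PySem.Set.ofList (k :: (A ++ B)) = k :: PySem.Set.ofList B := by
  have h1 : PySem.Set.ofList (k :: (A ++ B)) = PySem.Set.update (PySem.Set.ofList (k :: A)) B := by
    rw [show k :: (A ++ B) = (k :: A) ++ B from rfl, PySem.Set.ofList_append]
  have h2 : PySem.Set.ofList (k :: A) = [k] := by
    show List.foldl PySem.Set.add PySem.Set.empty (k :: A) = [k]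
    rw [List.foldl_cons, show PySem.Set.add PySem.Set.empty k = [k] from rfl]
    exact foldl_add_const k A hA
  rw [h1, h2, PySem.Set.update_eq_append_filter]
  have h3 : (PySem.Set.ofList B).filter (fun y => !(PySem.Set.contains [k] y)) = PySem.Set.ofList B := by
    apply List.filter_eq_self.mpr
    intro y hy
    have hyB : y ∈ B := (PySem.Set.mem_ofList _ _).1 hy
    have hyk : y ≠ k := fun h => hB (h ▸ hyB)
    simp [PySem.Set.contains, hyk]
  rw [h3]
  rfl

-- run decomposition of a key-sorted nonempty list
theorem run_decomp (p : String × Int) (t : List (String × Int))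
    (hsorted : ((p :: t).map Prod.fst).Pairwise (· ≤ ·)) :
    pvBRun p.1 t p.2 = (pvS (p :: t) p.1, t.dropWhile (fun q => q.1 == p.1)) ∧
    pvK (p :: t) = p.1 :: pvK (t.dropWhile (fun q => q.1 == p.1)) ∧
    (∀ q ∈ t.dropWhile (fun q => q.1 == p.1), p.1 < q.1) ∧
    ((t.dropWhile (fun q => q.1 == p.1)).map Prod.fst).Pairwise (· ≤ ·) ∧
    (∀ k, k ≠ p.1 → pvS (p :: t) k = pvS (t.dropWhile (fun q => q.1 == p.1)) k) ∧
    (t.dropWhile (fun q => q.1 == p.1)).length < (p :: t).length := by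
  rw [List.map_cons] at hsorted
  obtain ⟨hhead, htail⟩ := List.pairwise_cons.mp hsorted
  have hall : ∀ q ∈ t, p.1 ≤ q.1 := fun q hq => hhead q.1 (List.mem_map_of_mem hq)
  have hAkeys : ∀ x ∈ t.takeWhile (fun q => q.1 == p.1), x.1 = p.1 := by
    intro x hx
    simpa using List.mem_takeWhile_imp hx
  have hgt : ∀ q ∈ t.dropWhile (fun q => q.1 == p.1), p.1 < q.1 := dropRun_gt p.1 t hall htail
  have hsplit : t = t.takeWhile (fun q => q.1 == p.1) ++ t.dropWhile (fun q => q.1 == p.1) :=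
    (List.takeWhile_append_dropWhile).symm
  have hrun : pvBRun p.1 t p.2 = (pvS (p :: t) p.1, t.dropWhile (fun q => q.1 == p.1)) := by
    rw [pvBRun_spec p.1 t p.2 hall htail, pvS_cons, if_pos rfl]
  have hK : pvK (p :: t) = p.1 :: pvK (t.dropWhile (fun q => q.1 == p.1)) := by
    show PySem.Set.ofList ((p :: t).map Prod.fst) = _
    rw [List.map_cons]
    conv_lhs => rw [hsplit]
    rw [List.map_append]
    exact ofList_const_append p.1 _ _
      (fun x hx => by
        obtain ⟨q, hq, rfl⟩ := List.mem_map.mp hx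
        exact hAkeys q hq)
      (fun hmem => by
        obtain ⟨q, hq, hq1⟩ := List.mem_map.mp hmem
        exact absurd hq1 (ne_of_gt (hgt q hq)))
  have hsub : ((t.dropWhile (fun q => q.1 == p.1)).map Prod.fst).Pairwise (· ≤ ·) :=
    List.Pairwise.sublist ((List.dropWhile_sublist _).map _) htail
  have hS : ∀ k, k ≠ p.1 → pvS (p :: t) k = pvS (t.dropWhile (fun q => q.1 == p.1)) k := by
    intro k hk
    conv_lhs => rw [hsplit]
    rw [show p :: (t.takeWhile (fun q => q.1 == p.1) ++ t.dropWhile (fun q => q.1 == p.1))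
        = (p :: t.takeWhile (fun q => q.1 == p.1)) ++ t.dropWhile (fun q => q.1 == p.1) from rfl,
      pvS_append]
    have : pvS (p :: t.takeWhile (fun q => q.1 == p.1)) k = 0 := by
      apply pvS_eq_zero_of_not_key
      intro q hq
      rcases List.mem_cons.mp hq with rfl | hq'
      · exact fun h => hk h.symm
      · rw [hAkeys q hq']; exact fun h => hk h.symm
    rw [this, zero_add]
  have hlen : (t.dropWhile (fun q => q.1 == p.1)).length < (p :: t).length :=
    Nat.lt_succ_of_le (List.Sublist.length_le (List.dropWhile_sublist _))
  exact ⟨hrun, hK, hgt, hsub, hS, hlen⟩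

-- the distinct keys of a key-sorted list are strictly increasing
theorem pvK_lt : ∀ (n : Nat) (xs : List (String × Int)), xs.length ≤ n →
    (xs.map Prod.fst).Pairwise (· ≤ ·) → (pvK xs).Pairwise (· < ·) := by
  intro n
  induction n with
  | zero =>
    intro xs hlen _
    rw [List.length_eq_zero_iff.mp (Nat.le_zero.mp hlen)]
    exact List.Pairwise.nil
  | succ n ih =>
    intro xs hlen hsorted
    cases xs with
    | nil => exact List.Pairwise.nil
    | cons p t =>
      obtain ⟨_, hK, hgt, hsub, _, hlt⟩ := run_decomp p t hsorted
      rw [hK]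
      refine List.pairwise_cons.mpr ⟨?_, ih _ (by omega) hsub⟩
      intro k hk
      obtain ⟨q, hq, rfl⟩ := List.mem_map.mp ((PySem.Set.mem_ofList _ _).1 hk)
      exact hgt q hq

theorem max?_id_singleton (v : Int) : PySem.List.max? [v] (fun y => y) = some v :=
  max?_id_eq_some [v] v (by simp) (by simp)

theorem max?_id_combine (v : Int) (vs : List Int) (m' : Int)
    (h : PySem.List.max? vs (fun y => y) = some m') :
    PySem.List.max? (v :: vs) (fun y => y) = some (max v m') := by
  apply max?_id_eq_some
  · rcases le_total v m' with hle | hle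
    · exact List.mem_cons_of_mem _ (by rw [max_eq_right hle]; exact PySem.List.max?_mem h)
    · rw [max_eq_left hle]; exact List.mem_cons_self
  · intro y hy
    rcases List.mem_cons.mp hy with rfl | hy'
    · exact le_max_left _ _
    · exact le_trans (PySem.List.max?_isMax h y hy') (le_max_right _ _)

-- the outer scan on a key-sorted remainder, invariant over (best, winners)
theorem pvBScan_spec : ∀ (n : Nat) (xs : List (String × Int)), xs.length ≤ n →
    (xs.map Prod.fst).Pairwise (· ≤ ·) →
    ∀ (b : Int) (w : List String),
      pvBScan xs (some b) w
        = match PySem.List.max? ((pvK xs).map (pvS xs)) (fun y => y) with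
          | none => w
          | some m =>
            if m > b then (pvK xs).filter (fun k => decide (pvS xs k = m))
            else if m = b then w ++ (pvK xs).filter (fun k => decide (pvS xs k = m))
            else w := by
  intro n
  induction n with
  | zero =>
    intro xs hlen _ b w
    rw [List.length_eq_zero_iff.mp (Nat.le_zero.mp hlen)]
    simp [pvBScan, pvK, PySem.Set.ofList, PySem.Set.empty, PySem.List.max?]
  | succ n ih =>
    intro xs hlen hsorted b w
    cases xs with
    | nil => simp [pvBScan, pvK, PySem.Set.ofList, PySem.Set.empty, PySem.List.max?]
    | cons p t =>
      obtain ⟨hrun, hK, hgt, hsub, hS, hlt⟩ := run_decomp p t hsorted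
      set rest := t.dropWhile (fun q => q.1 == p.1) with hrest
      set total := pvS (p :: t) p.1 with htot
      -- the value list splits: head value total, then rest's values
      have hmapK : (pvK (p :: t)).map (pvS (p :: t)) = total :: (pvK rest).map (pvS rest) := by
        rw [hK, List.map_cons]
        congr 1
        apply List.map_congr_left
        intro k hk
        obtain ⟨q, hq, rfl⟩ := List.mem_map.mp ((PySem.Set.mem_ofList _ _).1 hk)
        exact hS q.1 (ne_of_gt (hgt q hq))
      have hfiltK : ∀ v : Int,
          (pvK (p :: t)).filter (fun k => decide (pvS (p :: t) k = v))
            = (if total = v then [p.1] else []) ++ (pvK rest).filter (fun k => decide (pvS rest k = v)) := by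
        intro v
        rw [hK, List.filter_cons]
        have : (pvK rest).filter (fun k => decide (pvS (p :: t) k = v))
            = (pvK rest).filter (fun k => decide (pvS rest k = v)) := by
          apply List.filter_congr
          intro k hk
          obtain ⟨q, hq, rfl⟩ := List.mem_map.mp ((PySem.Set.mem_ofList _ _).1 hk)
          rw [hS q.1 (ne_of_gt (hgt q hq))]
        rw [this]
        by_cases hv : total = v
        · simp [← htot, hv]
        · simp [← htot, hv]
      have hstep : ∀ (b' : Int) (w' : List String),
          pvBScan (p :: t) (some b') w'
            = if total > b' then pvBScan rest (some total) [p.1]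
              else if total = b' then pvBScan rest (some b') (w' ++ [p.1])
              else pvBScan rest (some b') w' := by
        intro b' w'
        rw [pvBScan]
        simp only [hrun]
      cases hrestcase : rest with
      | nil =>
        have hmax : PySem.List.max? ((pvK (p :: t)).map (pvS (p :: t))) (fun y => y) = some total := by
          rw [hmapK, hrestcase]
          simpa [pvK, PySem.Set.ofList, PySem.Set.empty] using max?_id_singleton total
        have hfilt : (pvK (p :: t)).filter (fun k => decide (pvS (p :: t) k = total)) = [p.1] := by
          rw [hfiltK total, hrestcase]
          simp [pvK, PySem.Set.ofList, PySem.Set.empty]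
        rw [hstep b w, hrestcase]
        rw [hmax]
        by_cases h1 : total > b
        · simp only [if_pos h1, pvBScan, hfilt]
        · by_cases h2 : total = b
          · simp only [if_neg h1, if_pos h2, pvBScan, hfilt]
          · simp only [if_neg h1, if_neg h2, pvBScan]
      | cons q r =>
        -- rest is nonempty: its value list is nonempty, giving some m'
        have hrestne : rest ≠ [] := by rw [hrestcase]; exact List.cons_ne_nil _ _
        have hKrestne : (pvK rest).map (pvS rest) ≠ [] := by
          rw [hrestcase]
          have : q.1 ∈ pvK (q :: r) := (PySem.Set.mem_ofList _ _).2 (by simp)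
          intro hnil
          rw [List.map_eq_nil_iff.mp hnil] at this
          simp at this
        obtain ⟨m', hm'⟩ : ∃ m', PySem.List.max? ((pvK rest).map (pvS rest)) (fun y => y) = some m' := by
          cases hcase : PySem.List.max? ((pvK rest).map (pvS rest)) (fun y => y) with
          | none => exact absurd ((PySem.List.max?_eq_none_iff _ _).mp hcase) hKrestne
          | some m' => exact ⟨m', rfl⟩
        have hmax : PySem.List.max? ((pvK (p :: t)).map (pvS (p :: t))) (fun y => y)
            = some (max total m') := by
          rw [hmapK]
          exact max?_id_combine total _ m' hm'
        have hrestbound : ∀ k ∈ pvK rest, pvS rest k ≤ m' := by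
          intro k hk
          exact PySem.List.max?_isMax hm' (pvS rest k) (List.mem_map_of_mem hk)
        have hemp : ∀ v : Int, m' < v → (pvK rest).filter (fun k => decide (pvS rest k = v)) = [] := by
          intro v hv
          apply List.filter_eq_nil_iff.mpr
          intro k hk
          have := hrestbound k hk
          simp only [decide_eq_true_eq]
          omega
        have ihrest := ih rest (by omega) hsub
        rw [hstep b w, hmax]
        by_cases h1 : total > b
        · rw [if_pos h1, ihrest total [p.1], hm']
          simp only []
          have hMgt : max total m' > b := lt_of_lt_of_le h1 (le_max_left _ _)
          rw [if_pos hMgt, hfiltK (max total m')]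
          by_cases h2 : m' > total
          · rw [max_eq_right (le_of_lt h2), if_pos h2, if_neg (by omega)]
            simp
          · by_cases h3 : m' = total
            · rw [h3, max_self, if_neg (by omega), if_pos rfl, if_pos rfl]
            · rw [max_eq_left (by omega), if_neg h2, if_neg h3, if_pos rfl, hemp total (by omega)]
              simp
        · have htb : total ≤ b := not_lt.mp h1
          by_cases h2 : total = b
          · rw [if_neg h1, if_pos h2, ihrest b (w ++ [p.1]), hm']
            simp only []
            rw [hfiltK (max total m')]
            by_cases h3 : m' > b
            · have hM : max total m' = m' := max_eq_right (le_trans htb (le_of_lt h3))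
              rw [hM, if_pos h3, if_pos h3, if_neg (ne_of_lt (lt_of_le_of_lt htb h3))]
              simp
            · have hmb : m' ≤ b := not_lt.mp h3
              by_cases h4 : m' = b
              · have hM : max total m' = b := by rw [h2, h4, max_self]
                rw [hM, h4, if_neg (lt_irrefl b), if_neg (lt_irrefl b), if_pos rfl, if_pos rfl,
                  if_pos h2]
                simp
              · have hM : max total m' = b := by rw [h2]; exact max_eq_left hmb
                rw [hM, if_neg h3, if_neg h4, if_neg (lt_irrefl b), if_pos rfl, if_pos h2,
                  hemp b (lt_of_le_of_ne hmb h4)]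
                simp
          · have htlt : total < b := lt_of_le_of_ne htb h2
            rw [if_neg h1, if_neg h2, ihrest b w, hm']
            simp only []
            rw [hfiltK (max total m')]
            by_cases h3 : m' > b
            · have hM : max total m' = m' := max_eq_right (le_of_lt (lt_trans htlt h3))
              rw [hM, if_pos h3, if_pos h3, if_neg (ne_of_lt (lt_trans htlt h3))]
              simp
            · have hmb : m' ≤ b := not_lt.mp h3
              by_cases h4 : m' = b
              · have hM : max total m' = b := by rw [h4]; exact max_eq_right (le_of_lt htlt)
                rw [hM, h4, if_neg (lt_irrefl b), if_neg (lt_irrefl b), if_pos rfl, if_pos rfl,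
                  if_neg (ne_of_lt htlt)]
                simp
              · have hMlt : max total m' < b := max_lt htlt (lt_of_le_of_ne hmb h4)
                rw [if_neg h3, if_neg h4, if_neg (lt_asymm hMlt), if_neg (ne_of_lt hMlt)]

-- the first iteration: best is None, so the first run always installs itself,
-- exactly as if best were total - 1
theorem pvBScan_top (xs : List (String × Int)) (hne : xs ≠ [])
    (hsorted : (xs.map Prod.fst).Pairwise (· ≤ ·)) :
    pvBScan xs none []
      = match PySem.List.max? ((pvK xs).map (pvS xs)) (fun y => y) with
        | none => []
        | some m => (pvK xs).filter (fun k => decide (pvS xs k = m)) := by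
  cases xs with
  | nil => exact absurd rfl hne
  | cons p t =>
    obtain ⟨hrun, hK, hgt, hsub, hS, hlt⟩ := run_decomp p t hsorted
    set rest := t.dropWhile (fun q => q.1 == p.1) with hrest
    set total := pvS (p :: t) p.1 with htot
    have hmapK : (pvK (p :: t)).map (pvS (p :: t)) = total :: (pvK rest).map (pvS rest) := by
      rw [hK, List.map_cons]
      congr 1
      apply List.map_congr_left
      intro k hk
      obtain ⟨q, hq, rfl⟩ := List.mem_map.mp ((PySem.Set.mem_ofList _ _).1 hk)
      exact hS q.1 (ne_of_gt (hgt q hq))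
    have h1 : pvBScan (p :: t) none [] = pvBScan rest (some total) [p.1] := by
      rw [pvBScan]
      simp only [hrun]
    have h2 : pvBScan (p :: t) (some (total - 1)) [] = pvBScan rest (some total) [p.1] := by
      rw [pvBScan]
      simp only [hrun]
      rw [if_pos (by omega)]
    rw [h1, ← h2, pvBScan_spec (p :: t).length (p :: t) le_rfl hsorted (total - 1) []]
    cases hm : PySem.List.max? ((pvK (p :: t)).map (pvS (p :: t))) (fun y => y) with
    | none => rfl
    | some m =>
      have hmem : total ∈ (pvK (p :: t)).map (pvS (p :: t)) := by
        rw [hmapK]; exact List.mem_cons_self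
      have hge : total ≤ m := PySem.List.max?_isMax hm total hmem
      simp only []
      rw [if_pos (by omega)]

theorem maxaggregate_spec' (l : List (String × Int)) (hl : l ≠ []) :
    maxaggregate l = maxaggregate_alt l := by
  set s := PySem.List.sorted l (fun p => p.1) false with hs
  have hperm : s.Perm l := PySem.List.sorted_perm l (fun p => p.1) false
  have hsorted : (s.map Prod.fst).Pairwise (· ≤ ·) := by
    rw [List.pairwise_map]
    exact PySem.List.sorted_pairwise l (fun p => p.1)
  have hne : s ≠ [] := by
    rw [hs, Ne, PySem.List.sorted_eq_nil_iff]
    exact hl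
  have hSeq : ∀ k, pvS s k = pvS l k := fun k => pvS_perm s l hperm k
  have hKmem : ∀ k, k ∈ pvK s ↔ k ∈ pvK l := by
    intro k
    rw [pvK, pvK, PySem.Set.mem_ofList, PySem.Set.mem_ofList]
    exact (hperm.map Prod.fst).mem_iff
  -- the maximum over l's keys is some m, and the same for s
  obtain ⟨m, hm⟩ : ∃ m, PySem.List.max? ((pvK l).map (pvS l)) (fun y => y) = some m := by
    cases hcase : PySem.List.max? ((pvK l).map (pvS l)) (fun y => y) with
    | none =>
      exfalso
      have hnil := (PySem.List.max?_eq_none_iff _ _).mp hcase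
      cases l with
      | nil => exact hl rfl
      | cons p t =>
        have : p.1 ∈ pvK (p :: t) := (PySem.Set.mem_ofList _ _).2 (by simp)
        rw [List.map_eq_nil_iff.mp hnil] at this
        simp at this
    | some m => exact ⟨m, rfl⟩
  have hms : PySem.List.max? ((pvK s).map (pvS s)) (fun y => y) = some m := by
    apply max?_id_eq_some
    · obtain ⟨k, hk, hkm⟩ := List.mem_map.mp (PySem.List.max?_mem hm)
      exact List.mem_map.mpr ⟨k, (hKmem k).mpr hk, by rw [hSeq k, hkm]⟩
    · intro y hy
      obtain ⟨k, hk, rfl⟩ := List.mem_map.mp hy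
      rw [hSeq k]
      exact PySem.List.max?_isMax hm (pvS l k) (List.mem_map_of_mem ((hKmem k).mp hk))
  -- A's side in normal form
  rw [A_normal_form l, hm]
  -- B's side
  have hB : maxaggregate_alt l = (pvK s).filter (fun k => decide (pvS s k = m)) := by
    rw [maxaggregate_alt, ← hs, pvBScan_top s hne hsorted, hms]
  rw [hB]
  -- the two filtered key lists are a permutation of each other, and B's is strictly sorted
  apply PySem.List.sorted_eq_of_perm_of_pairwise_lt
  · apply (List.perm_ext_iff_of_nodup ((PySem.Set.nodup_ofList _).filter _)
      ((PySem.Set.nodup_ofList _).filter _)).mpr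
    intro k
    rw [List.mem_filter, List.mem_filter]
    constructor
    · rintro ⟨hk, hpred⟩
      exact ⟨(hKmem k).mp hk, by rwa [← hSeq k]⟩
    · rintro ⟨hk, hpred⟩
      exact ⟨(hKmem k).mpr hk, by rwa [hSeq k]⟩
  · exact List.Pairwise.filter _ (pvK_lt s.length s le_rfl hsorted)

-- ===== VERDICT (by name: the statement is the Claim_ definition above) =====
theorem maxaggregate_spec : Claim_equal_maxaggregate := by
  intro l _ hpre
  unfold Spec_maxaggregate
  exact maxaggregate_spec' l hpre
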